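-- pv_equiv track=rewrite | github.com/smargetic/CSE_537-Artificial_Intelligence | Homework1/functionsForBothSearches.py | convertPositions
-- ===== SOURCE A (Python) =====
-- def convertPositions(inputList):
--     for i in range(0,len(inputList)):
--         for j in range(0,len(inputList[i])):
--             if(inputList[i][j]<=5):
--                 inputList[i][j] = inputList[i][j]-3
--             elif(inputList[i][j]<=12):
--                 inputList[i][j] = inputList[i][j]-7
--             elif(inputList[i][j]<=35):
--                 inputList[i][j] = inputList[i][j]-9
--             elif(inputList[i][j]<=40):
--                 inputList[i][j] = inputList[i][j]-11
--             elif(inputList[i][j]<=47):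
--                 inputList[i][j] = inputList[i][j]-15
--     return inputList
-- ===== SOURCE B (Python) =====
-- # Staged band passes: first a whole-matrix pass for v<=5, then one full pass per
-- # remaining band (lo, hi], each rebuilding the matrix functionally. Ascending order
-- # is correct because every converted value drops below all later bands' lower bounds,
-- # so no element is ever touched twice. Inner rows are rebuilt (not mutated in place
-- # like A's per-element assignment); the outer list is updated to hold the new rows.
--
-- def _band(lo, hi, d, m):
--     return [[v - d if lo < v <= hi else v for v in row] for row in m]
--
--
-- def convertPositions(inputList):
--     m = [[v - 3 if v <= 5 else v for v in row] for row in inputList]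
--     for lo, hi, d in ((5, 12, 7), (12, 35, 9), (35, 40, 11), (40, 47, 15)):
--         m = _band(lo, hi, d, m)
--     inputList[:] = m
--     return inputList
-- ===== Notes on version B (the rewrite author's own statement) =====
-- stated objective: alternative
-- what changed: Replaces the single pass with a per-element five-branch ladder by five staged whole-matrix passes, one per value band, each a functional rebuild that subtracts that band's constant; ascending band order guarantees no element is converted twice. Inner rows are rebuilt rather than mutated element-wise in place (return value identical).
import Mathlib
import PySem

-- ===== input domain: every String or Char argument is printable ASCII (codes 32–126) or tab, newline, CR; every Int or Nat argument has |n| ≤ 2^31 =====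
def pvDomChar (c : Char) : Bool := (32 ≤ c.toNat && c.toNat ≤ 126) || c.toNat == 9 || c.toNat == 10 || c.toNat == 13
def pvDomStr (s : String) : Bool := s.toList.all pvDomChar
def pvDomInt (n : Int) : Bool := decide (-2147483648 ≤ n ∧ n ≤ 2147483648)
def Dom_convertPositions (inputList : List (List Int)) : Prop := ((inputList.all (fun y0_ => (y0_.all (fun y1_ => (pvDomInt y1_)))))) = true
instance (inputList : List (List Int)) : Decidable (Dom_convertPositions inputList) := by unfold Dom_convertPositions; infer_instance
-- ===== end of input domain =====

-- B replaces A's single pass with a per-element if/elif ladder by five staged whole-matrix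
-- passes, one per value band, each a functional rebuild; return values are equal, but A mutates
-- elements of the original inner lists in place while B rebuilds fresh rows (the equivalence
-- proved here is about the return value only).

-- ===== PORT A =====
def convertPositions (inputList : List (List Int)) : List (List Int) :=
  (PySem.List.pyRange 0 (inputList.length : Int) 1).foldl (fun acc i =>
    let row := acc.getD i.toNat []
    let row' := (PySem.List.pyRange 0 (row.length : Int) 1).foldl (fun r j =>
      let v := r.getD j.toNat 0
      if v ≤ 5 then r.set j.toNat (v - 3)
      else if v ≤ 12 then r.set j.toNat (v - 7)
      else if v ≤ 35 then r.set j.toNat (v - 9)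
      else if v ≤ 40 then r.set j.toNat (v - 11)
      else if v ≤ 47 then r.set j.toNat (v - 15)
      else r) row
    acc.set i.toNat row') inputList

-- ===== PORT B =====
-- one staged pass: subtract d from every element in the band (lo, hi]
def pvBand (lo hi d : Int) (m : List (List Int)) : List (List Int) :=
  m.map (fun row => row.map (fun v => if lo < v ∧ v ≤ hi then v - d else v))

def convertPositions_alt (inputList : List (List Int)) : List (List Int) :=
  let m0 := inputList.map (fun row => row.map (fun v => if v ≤ 5 then v - 3 else v))
  [(5, 12, 7), (12, 35, 9), (35, 40, 11), (40, 47, 15)].foldl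
    (fun m t => pvBand t.1 t.2.1 t.2.2 m) m0

-- ===== PRECONDITION & SPEC =====
def Spec_convertPositions (inputList : List (List Int)) (out : List (List Int)) : Prop := out = convertPositions_alt inputList
instance (inputList : List (List Int)) (out : List (List Int)) : Decidable (Spec_convertPositions inputList out) := by unfold Spec_convertPositions; infer_instance

-- ===== CLAIM (what is proved, stated in full; the proofs are below) =====
def Claim_equal_convertPositions : Prop := ∀ (inputList : List (List Int)), Dom_convertPositions inputList → Spec_convertPositions inputList (convertPositions inputList)

-- ===== LEMMAS AND PROOFS =====

-- A's per-element ladder, factored out for the proof.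
def pvStepA (v : Int) : Int :=
  if v ≤ 5 then v - 3
  else if v ≤ 12 then v - 7
  else if v ≤ 35 then v - 9
  else if v ≤ 40 then v - 11
  else if v ≤ 47 then v - 15
  else v

lemma pv_set_getD_self {α : Type} (l : List α) (n : Nat) (d : α) :
    l.set n ((l[n]?).getD d) = l := by
  induction l generalizing n with
  | nil => simp
  | cons a t ih =>
    cases n with
    | zero => simp
    | succ m => simp [ih]

-- the generic loop shape: 'for i in range(len(l)): l[i] = g(l[i])' returns l.map g
lemma pv_set_loop_eq_map {α : Type} (g : α → α) (d : α) :
    ∀ (todo done : List α),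
    (PySem.List.pyRange (done.length : Int) (((done.length + todo.length : Nat) : Int)) 1).foldl
      (fun r i => r.set i.toNat (g (r.getD i.toNat d))) (done ++ todo)
    = done ++ todo.map g := by
  intro todo
  induction todo with
  | nil =>
    intro done
    rw [PySem.List.pyRange_one_eq_nil (by simp)]
    simp
  | cons x t ih =>
    intro done
    rw [PySem.List.pyRange_one_cons (by push_cast [List.length_cons]; omega)]
    simp only [List.foldl_cons, Int.toNat_natCast]
    have hget : (done ++ x :: t).getD done.length d = x := by
      simp [List.getD]
    have hset : (done ++ x :: t).set done.length (g x) = (done ++ [g x]) ++ t := by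
      rw [List.set_append_right _ _ (Nat.le_refl done.length)]
      simp
    rw [hget, hset]
    have := ih (done ++ [g x])
    have hlen : ((done ++ [g x]).length : Int) = (done.length : Int) + 1 := by simp
    have hlen2 : (((done ++ [g x]).length + t.length : Nat) : Int)
        = ((done.length + (x :: t).length : Nat) : Int) := by simp; omega
    rw [hlen, hlen2] at this
    rw [this]
    simp

-- A's inner loop body is 'set j (pvStepA r[j])' (the final else is the identity set).
lemma pv_ladder_eq (r : List Int) (j : Int) :
    (let v := r.getD j.toNat 0
     if v ≤ 5 then r.set j.toNat (v - 3)
     else if v ≤ 12 then r.set j.toNat (v - 7)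
     else if v ≤ 35 then r.set j.toNat (v - 9)
     else if v ≤ 40 then r.set j.toNat (v - 11)
     else if v ≤ 47 then r.set j.toNat (v - 15)
     else r)
    = r.set j.toNat (pvStepA (r.getD j.toNat 0)) := by
  simp only [pvStepA]
  split_ifs <;> simp [List.getD, pv_set_getD_self]

lemma pv_rowloop_eq_map (row : List Int) :
    (PySem.List.pyRange 0 (row.length : Int) 1).foldl (fun r j =>
      let v := r.getD j.toNat 0
      if v ≤ 5 then r.set j.toNat (v - 3)
      else if v ≤ 12 then r.set j.toNat (v - 7)
      else if v ≤ 35 then r.set j.toNat (v - 9)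
      else if v ≤ 40 then r.set j.toNat (v - 11)
      else if v ≤ 47 then r.set j.toNat (v - 15)
      else r) row
    = row.map pvStepA := by
  have hfun : (fun (r : List Int) (j : Int) =>
      let v := r.getD j.toNat 0
      if v ≤ 5 then r.set j.toNat (v - 3)
      else if v ≤ 12 then r.set j.toNat (v - 7)
      else if v ≤ 35 then r.set j.toNat (v - 9)
      else if v ≤ 40 then r.set j.toNat (v - 11)
      else if v ≤ 47 then r.set j.toNat (v - 15)
      else r)
      = (fun (r : List Int) (j : Int) => r.set j.toNat (pvStepA (r.getD j.toNat 0))) := by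
    funext r j; exact pv_ladder_eq r j
  rw [hfun]
  have := pv_set_loop_eq_map pvStepA 0 row []
  simpa using this

lemma pv_outer_eq_map (inputList : List (List Int)) :
    convertPositions inputList = inputList.map (fun row => row.map pvStepA) := by
  unfold convertPositions
  have hfun : (fun (acc : List (List Int)) (i : Int) =>
      let row := acc.getD i.toNat []
      let row' := (PySem.List.pyRange 0 (row.length : Int) 1).foldl (fun r j =>
        let v := r.getD j.toNat 0
        if v ≤ 5 then r.set j.toNat (v - 3)
        else if v ≤ 12 then r.set j.toNat (v - 7)
        else if v ≤ 35 then r.set j.toNat (v - 9)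
        else if v ≤ 40 then r.set j.toNat (v - 11)
        else if v ≤ 47 then r.set j.toNat (v - 15)
        else r) row
      acc.set i.toNat row')
      = (fun (acc : List (List Int)) (i : Int) =>
          acc.set i.toNat ((fun row => row.map pvStepA) (acc.getD i.toNat []))) := by
    funext acc i
    simp only [pv_rowloop_eq_map]
  rw [hfun]
  have := pv_set_loop_eq_map (fun row => row.map pvStepA) [] inputList []
  simpa using this

-- B's five staged passes, fused pointwise, equal A's ladder on each element.
lemma pv_alt_eq_map (inputList : List (List Int)) :
    convertPositions_alt inputList = inputList.map (fun row => row.map pvStepA) := by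
  unfold convertPositions_alt pvBand
  simp only [List.foldl_cons, List.foldl_nil, List.map_map, Function.comp_def]
  apply List.map_congr_left
  intro row _
  apply List.map_congr_left
  intro v _
  simp only [pvStepA]
  split_ifs <;> omega

-- ===== VERDICT (by name: the statement is the Claim_ definition above) =====
theorem convertPositions_spec : Claim_equal_convertPositions := by
  intro inputList _
  unfold Spec_convertPositions
  rw [pv_outer_eq_map, pv_alt_eq_map]
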